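-- pv_equiv track=rewrite | github.com/AaronSosaRamos/sageai-universal-api | app/db/analytics_management.py | _personalization_from_sample
-- ===== SOURCE A (Python) =====
-- from collections import Counter
-- from typing import Any, Dict, List, Optional
--
-- def _personalization_from_sample(
--     sample: List[Dict[str, Any]]
-- ) -> Dict[str, Any]:
--     cat_counts = Counter(r.get("event_category", "") for r in sample)
--     name_counts = Counter(r.get("event_name", "") for r in sample)
--     return {
--         "custom_space_updates": cat_counts.get("custom_space", 0),
--         "memory_events":        cat_counts.get("memory", 0),
--         "assistant_events":     cat_counts.get("assistant", 0),
--         "chat_events":          cat_counts.get("chat", 0),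
--         "storage_events":       cat_counts.get("storage", 0),
--         "session_events":       name_counts.get("session.started", 0),
--         "personalization_total": (
--             cat_counts.get("custom_space", 0)
--             + cat_counts.get("memory", 0)
--             + cat_counts.get("assistant", 0)
--         ),
--     }
-- ===== SOURCE B (Python) =====
-- _SPEC = [
--     ("custom_space_updates", "event_category", "custom_space"),
--     ("memory_events",        "event_category", "memory"),
--     ("assistant_events",     "event_category", "assistant"),
--     ("chat_events",          "event_category", "chat"),
--     ("storage_events",       "event_category", "storage"),
--     ("session_events",       "event_name",     "session.started"),
-- ]
--
-- def _personalization_from_sample(sample):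
--     out = {
--         key: sum(1 for r in sample if r.get(field, "") == value)
--         for key, field, value in _SPEC
--     }
--     out["personalization_total"] = (
--         out["custom_space_updates"] + out["memory_events"] + out["assistant_events"]
--     )
--     return out
-- ===== Notes on version B (the rewrite author's own statement) =====
-- stated objective: simpler
-- what changed: Instead of building two full Counter histograms and looking keys up, B is table-driven: a spec table of (output key, record field, value) drives one dedicated filtered scan (sum of a generator) per output key, and the total is read back from the already-built dict.
import Mathlib
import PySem

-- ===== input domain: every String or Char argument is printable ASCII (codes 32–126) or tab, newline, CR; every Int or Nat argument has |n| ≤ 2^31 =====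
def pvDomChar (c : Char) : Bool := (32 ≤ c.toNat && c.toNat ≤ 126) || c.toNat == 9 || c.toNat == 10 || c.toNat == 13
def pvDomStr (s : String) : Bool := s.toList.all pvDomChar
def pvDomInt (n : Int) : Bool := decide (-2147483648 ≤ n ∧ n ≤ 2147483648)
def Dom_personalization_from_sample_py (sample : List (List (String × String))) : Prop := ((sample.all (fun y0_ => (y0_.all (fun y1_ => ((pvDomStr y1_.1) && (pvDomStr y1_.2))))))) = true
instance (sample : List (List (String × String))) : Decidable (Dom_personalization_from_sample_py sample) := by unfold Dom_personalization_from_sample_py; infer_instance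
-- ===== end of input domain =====

-- B is table-driven: a spec table drives one filtered scan per output key instead of A's two Counter histograms (objective: simpler).

-- ===== PORT A =====
-- r.get(k, "") on a record dict
def pvRecGet (r : List (String × String)) (k : String) : String :=
  (PySem.Dict.ofList r).getD k ""

def personalization_from_sample_py (sample : List (List (String × String))) : List (String × Int) :=
  let cat_counts := PySem.Dict.counter (sample.map (fun r => pvRecGet r "event_category"))
  let name_counts := PySem.Dict.counter (sample.map (fun r => pvRecGet r "event_name"))
  [("custom_space_updates", cat_counts.getD "custom_space" 0),
   ("memory_events",        cat_counts.getD "memory" 0),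
   ("assistant_events",     cat_counts.getD "assistant" 0),
   ("chat_events",          cat_counts.getD "chat" 0),
   ("storage_events",       cat_counts.getD "storage" 0),
   ("session_events",       name_counts.getD "session.started" 0),
   ("personalization_total",
      cat_counts.getD "custom_space" 0 + cat_counts.getD "memory" 0
        + cat_counts.getD "assistant" 0)]

-- ===== PORT B =====
-- the spec table _SPEC: (output key, record field, value to match)
def pvSpec : List (String × String × String) :=
  [("custom_space_updates", "event_category", "custom_space"),
   ("memory_events",        "event_category", "memory"),
   ("assistant_events",     "event_category", "assistant"),
   ("chat_events",          "event_category", "chat"),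
   ("storage_events",       "event_category", "storage"),
   ("session_events",       "event_name",     "session.started")]

-- sum(1 for r in sample if r.get(field, "") == value)
def pvTally (sample : List (List (String × String))) (field value : String) : Int :=
  sample.foldl (fun acc r => if pvRecGet r field == value then acc + 1 else acc) 0

def personalization_from_sample_py_alt (sample : List (List (String × String))) : List (String × Int) :=
  -- dict comprehension over the spec table
  let out : PySem.Dict String Int :=
    pvSpec.foldl (fun d kfv => d.insert kfv.1 (pvTally sample kfv.2.1 kfv.2.2)) PySem.Dict.empty
  -- out["personalization_total"] = out[...] + out[...] + out[...]
  (out.insert "personalization_total"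
      (out.getD "custom_space_updates" 0 + out.getD "memory_events" 0
        + out.getD "assistant_events" 0)).items

-- ===== PRECONDITION & SPEC =====
def Spec_personalization_from_sample_py (sample : List (List (String × String))) (out : List (String × Int)) : Prop := out = personalization_from_sample_py_alt sample
instance (sample : List (List (String × String))) (out : List (String × Int)) : Decidable (Spec_personalization_from_sample_py sample out) := by unfold Spec_personalization_from_sample_py; infer_instance

-- ===== CLAIM (what is proved, stated in full; the proofs are below) =====
def Claim_equal_personalization_from_sample_py : Prop := ∀ (sample : List (List (String × String))), Dom_personalization_from_sample_py sample → Spec_personalization_from_sample_py sample (personalization_from_sample_py sample)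

-- ===== LEMMAS AND PROOFS =====
theorem pvTally_eq_count (sample : List (List (String × String))) (f v : String) :
    pvTally sample f v = ((sample.map (fun r => pvRecGet r f)).count v : Int) := by
  unfold pvTally
  rw [PySem.List.foldl_if_add_one]
  simp [List.count_eq_countP, List.countP_map, Function.comp_def]

-- ===== VERDICT (by name: the statement is the Claim_ definition above) =====
theorem personalization_from_sample_py_spec : Claim_equal_personalization_from_sample_py := by
  intro sample _
  unfold Spec_personalization_from_sample_py personalization_from_sample_py
    personalization_from_sample_py_alt pvSpec
  simp only [PySem.Dict.getD_counter]
  simp [pvTally_eq_count, List.foldl, PySem.Dict.insert, PySem.Dict.empty,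
    PySem.Dict.getD, PySem.Dict.get?]
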